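-- pv_equiv track=rewrite | github.com/hetvirani18/Eagles-x-DAIICT | backend/services/interactive_investment_tools.py | _find_common_attributes
-- ===== SOURCE A (Python) =====
-- from typing import Dict, List, Optional, Tuple
--
-- def _find_common_attributes(locations: List[Dict], attribute: str) -> List[str]:
--     """Find common attributes across locations"""
--
--     all_attributes = []
--     for loc in locations:
--         all_attributes.extend(loc.get(attribute, []))
--
--     # Count frequency
--     attr_counts = {}
--     for attr in all_attributes:
--         attr_counts[attr] = attr_counts.get(attr, 0) + 1
--
--     # Return attributes that appear in multiple locations
--     common = [attr for attr, count in attr_counts.items() if count >= 2]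
--     return common[:3]  # Top 3 common attributes
-- ===== SOURCE B (Python) =====
-- from typing import Dict, List, Optional, Tuple
--
-- def _find_common_attributes(locations: List[Dict], attribute: str) -> List[str]:
--     """Find common attributes across locations"""
--     values = [a for loc in locations for a in loc.get(attribute, [])]
--
--     # First pass: a 'seen once' set; anything met again is frequent.
--     seen, frequent = set(), set()
--     for a in values:
--         if a in seen:
--             frequent.add(a)
--         else:
--             seen.add(a)
--
--     # Second pass: emit frequent attributes in first-appearance order, up to 3.
--     result, emitted = [], set()
--     for a in values:
--         if a in frequent and a not in emitted:
--             result.append(a)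
--             emitted.add(a)
--             if len(result) == 3:
--                 break
--     return result
-- ===== Notes on version B (the rewrite author's own statement) =====
-- stated objective: alternative
-- what changed: Replaces A's frequency dict (count, then filter dict items) by two set-based passes over the flattened value stream: a seen/frequent set pair marks attributes met twice, then a second pass emits frequent attributes in first-appearance order and breaks as soon as three are emitted.
import Mathlib
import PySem

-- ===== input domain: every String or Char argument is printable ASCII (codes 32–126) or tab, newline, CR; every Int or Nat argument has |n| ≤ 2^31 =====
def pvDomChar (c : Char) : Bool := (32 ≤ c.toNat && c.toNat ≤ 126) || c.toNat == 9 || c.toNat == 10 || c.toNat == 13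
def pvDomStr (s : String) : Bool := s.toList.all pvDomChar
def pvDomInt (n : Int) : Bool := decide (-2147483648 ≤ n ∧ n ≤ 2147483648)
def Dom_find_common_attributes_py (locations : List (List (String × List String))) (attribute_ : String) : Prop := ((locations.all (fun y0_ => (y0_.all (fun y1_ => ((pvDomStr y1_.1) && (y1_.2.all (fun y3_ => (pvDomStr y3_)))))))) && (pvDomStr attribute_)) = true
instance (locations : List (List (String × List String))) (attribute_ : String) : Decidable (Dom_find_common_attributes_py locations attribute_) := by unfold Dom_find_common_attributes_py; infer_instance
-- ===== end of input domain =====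

-- B replaces A's frequency dict by a seen/frequent set pair and a second pass over the
-- flattened value stream that emits first occurrences of frequent attributes, stopping at 3
-- (objective: alternative decomposition, same asymptotic cost).

-- ===== PORT A =====
def find_common_attributes_py (locations : List (List (String × List String))) (attribute_ : String) : List String :=
  let all_attributes := locations.foldl (fun acc loc => acc ++ (PySem.Dict.mk loc).getD attribute_ []) []
  let attr_counts := all_attributes.foldl (fun d attr => d.insert attr (d.getD attr 0 + 1)) (PySem.Dict.empty : PySem.Dict String Int)
  let common := (attr_counts.items.filter (fun p => 2 ≤ p.2)).map Prod.fst
  common.take 3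

-- ===== PORT B =====
-- second pass of Source B: emit frequent, not-yet-emitted attributes in order, break at 3
def pvEmit (freq : String → Bool) : List String → PySem.Set String → List String → List String
  | [], _, res => res
  | a :: t, emitted, res =>
      if freq a && !(PySem.Set.contains emitted a) then
        let res' := res ++ [a]
        if res'.length = 3 then res' else pvEmit freq t (PySem.Set.add emitted a) res'
      else pvEmit freq t emitted res

def find_common_attributes_py_alt (locations : List (List (String × List String))) (attribute_ : String) : List String :=
  let values := locations.flatMap (fun loc => (PySem.Dict.mk loc).getD attribute_ [])
  let sf := values.foldl
      (fun (p : PySem.Set String × PySem.Set String) a =>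
        if PySem.Set.contains p.1 a then (p.1, PySem.Set.add p.2 a) else (PySem.Set.add p.1 a, p.2))
      (PySem.Set.empty, PySem.Set.empty)
  pvEmit (fun a => PySem.Set.contains sf.2 a) values PySem.Set.empty []

-- ===== PRECONDITION & SPEC =====
def Spec_find_common_attributes_py (locations : List (List (String × List String))) (attribute_ : String) (out : List String) : Prop := out = find_common_attributes_py_alt locations attribute_
instance (locations : List (List (String × List String))) (attribute_ : String) (out : List String) : Decidable (Spec_find_common_attributes_py locations attribute_ out) := by unfold Spec_find_common_attributes_py; infer_instance

-- ===== CLAIM (what is proved, stated in full; the proofs are below) =====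
def Claim_equal_find_common_attributes_py : Prop := ∀ (locations : List (List (String × List String))) (attribute_ : String), Dom_find_common_attributes_py locations attribute_ → Spec_find_common_attributes_py locations attribute_ (find_common_attributes_py locations attribute_)

-- ===== LEMMAS AND PROOFS =====

-- the stream of attributes pvEmit would append, ignoring the cap of 3
def pvRest (freq : String → Bool) : List String → PySem.Set String → List String
  | [], _ => []
  | a :: t, emitted =>
      if freq a && !(PySem.Set.contains emitted a) then a :: pvRest freq t (PySem.Set.add emitted a)
      else pvRest freq t emitted

theorem pvEmit_eq_rest (freq : String → Bool) :
    ∀ (xs : List String) (em : PySem.Set String) (res : List String), res.length < 3 →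
    pvEmit freq xs em res = res ++ (pvRest freq xs em).take (3 - res.length) := by
  intro xs
  induction xs with
  | nil => intro em res _; simp [pvEmit, pvRest]
  | cons a t ih =>
    intro em res hlt
    simp only [pvEmit, pvRest]
    by_cases hc : (freq a && !(PySem.Set.contains em a)) = true
    · simp only [hc, if_true]
      by_cases h3 : (res ++ [a]).length = 3
      · have : 3 - res.length = 1 := by simp at h3; omega
        simp [h3, this]
      · have hlen : (res ++ [a]).length < 3 := by
          simp at h3 ⊢; omega
        rw [if_neg h3, ih _ _ hlen]
        have : 3 - res.length = (3 - (res ++ [a]).length) + 1 := by simp; omega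
        simp [this]
    · simp only [hc]
      exact ih _ _ hlt

theorem pvRest_eq (freq : String → Bool) :
    ∀ (xs : List String) (em : PySem.Set String),
    pvRest freq xs em = (PySem.Set.update em (xs.filter freq)).drop em.length := by
  intro xs
  induction xs with
  | nil => intro em; simp [pvRest, PySem.Set.update_nil, List.drop_length]
  | cons a t ih =>
    intro em
    by_cases hf : freq a = true
    · by_cases hm : a ∈ em
      · have hct : PySem.Set.contains em a = true := List.elem_eq_true_of_mem hm
        have hadd : PySem.Set.add em a = em := by simp [PySem.Set.add, hm]
        rw [List.filter_cons, if_pos hf, PySem.Set.update_cons, hadd, ← ih]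
        simp only [pvRest]
        simp
        intro _ h'
        exact absurd hm h'
      · have hct : PySem.Set.contains em a = false := by
          cases hcc : PySem.Set.contains em a
          · rfl
          · exact absurd (List.mem_of_elem_eq_true hcc) hm
        have hadd : PySem.Set.add em a = em ++ [a] := by simp [PySem.Set.add, hm]
        rw [List.filter_cons, if_pos hf, PySem.Set.update_cons, hadd]
        simp [pvRest, hf, hadd, ih, PySem.Set.update_eq_append_filter, List.append_assoc]
        intro h'
        exact absurd h' hm
    · rw [List.filter_cons, if_neg hf, ← ih]
      simp [pvRest, hf]

-- first pass of Source B: membership in the frequent set = appearing at least twice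
theorem pvFreq_mem (a : String) :
    ∀ (xs : List String) (s f : PySem.Set String),
    (a ∈ (xs.foldl
      (fun (p : PySem.Set String × PySem.Set String) x =>
        if PySem.Set.contains p.1 x then (p.1, PySem.Set.add p.2 x) else (PySem.Set.add p.1 x, p.2))
      (s, f)).2) ↔ (a ∈ f ∨ (a ∈ s ∧ a ∈ xs) ∨ 2 ≤ xs.count a) := by
  intro xs
  induction xs with
  | nil => intro s f; simp
  | cons x t ih =>
    intro s f
    rw [List.foldl_cons]
    by_cases hm : PySem.Set.contains s x = true
    · have hsx : x ∈ s := List.mem_of_elem_eq_true hm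
      rw [if_pos hm, ih]
      by_cases hax : a = x
      · subst hax
        simp [PySem.Set.mem_add, hsx]
      · have hxa : ¬ x = a := fun h => hax h.symm
        simp [PySem.Set.mem_add, hax, hxa]
    · have hsx : x ∉ s := fun h => hm (List.elem_eq_true_of_mem h)
      rw [if_neg hm, ih]
      by_cases hax : a = x
      · subst hax
        have hc : a ∈ t ↔ 1 ≤ t.count a := Iff.symm List.one_le_count_iff
        simp only [PySem.Set.mem_add, List.mem_cons, List.count_cons_self]
        constructor
        · rintro (h | ⟨h1 | h1, h2⟩ | h)
          · exact Or.inl h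
          · exact Or.inr (Or.inl ⟨h1, Or.inl trivial⟩)
          · exact Or.inr (Or.inr (by have := hc.mp h2; omega))
          · exact Or.inr (Or.inr (by omega))
        · rintro (h | ⟨h1, h2⟩ | h)
          · exact Or.inl h
          · exact absurd h1 hsx
          · exact Or.inr (Or.inl ⟨Or.inr trivial, hc.mpr (by omega)⟩)
      · have hxa : ¬ x = a := fun h => hax h.symm
        simp [PySem.Set.mem_add, hax, hxa, List.mem_cons]

-- filtering commutes with the fold that builds a PySem.Set
theorem pvAdd_filter (p : String → Bool) (s : List String) (x : String) :
    (PySem.Set.add s x).filter p = if p x then PySem.Set.add (s.filter p) x else s.filter p := by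
  by_cases hxs : x ∈ s
  · have h1 : PySem.Set.add s x = s := by simp [PySem.Set.add, hxs]
    rw [h1]
    by_cases hp : p x = true
    · have hmf : x ∈ s.filter p := List.mem_filter.mpr ⟨hxs, hp⟩
      simp [hp, PySem.Set.add, hmf]
    · simp [hp]
  · have h1 : PySem.Set.add s x = s ++ [x] := by simp [PySem.Set.add, hxs]
    rw [h1, List.filter_append]
    by_cases hp : p x = true
    · have hnf : x ∉ s.filter p := fun h => hxs (List.mem_filter.mp h).1
      simp [hp, PySem.Set.add, hnf]
    · simp [hp]

theorem pvFoldAdd_filter (p : String → Bool) :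
    ∀ (l s : List String),
    (l.foldl PySem.Set.add s).filter p = (l.filter p).foldl PySem.Set.add (s.filter p) := by
  intro l
  induction l with
  | nil => intro s; simp
  | cons x t ih =>
    intro s
    rw [List.foldl_cons, ih, pvAdd_filter, List.filter_cons]
    by_cases hp : p x = true
    · simp [hp]
    · simp [hp]

theorem pvOfList_filter (p : String → Bool) (l : List String) :
    (PySem.Set.ofList l).filter p = PySem.Set.ofList (l.filter p) := by
  rw [PySem.Set.ofList_eq_foldl, PySem.Set.ofList_eq_foldl, pvFoldAdd_filter]
  rfl

-- ===== VERDICT (by name: the statement is the Claim_ definition above) =====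
theorem find_common_attributes_py_spec : Claim_equal_find_common_attributes_py := by
  intro locations attribute_ _
  unfold Spec_find_common_attributes_py find_common_attributes_py find_common_attributes_py_alt
  rw [PySem.List.foldl_append_eq_flatMap]
  simp only [List.nil_append]
  set vals := locations.flatMap (fun loc => (PySem.Dict.mk loc).getD attribute_ []) with hvals
  rw [PySem.Dict.foldl_insert_getD_add_one_eq_counter, PySem.Dict.items_counter]
  rw [pvEmit_eq_rest _ _ _ _ (by simp), pvRest_eq]
  rw [List.filter_map, List.map_map]
  simp only [List.nil_append, PySem.Set.empty, List.length_nil, Nat.sub_zero, List.drop_zero,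
    PySem.Set.update_nil_left]
  have hfst : (Prod.fst ∘ fun k : String => (k, (vals.count k : Int))) = id := rfl
  rw [hfst, List.map_id]
  have hcomp : ((fun p : String × Int => decide (2 ≤ p.2)) ∘ fun k : String => (k, (vals.count k : Int)))
      = fun k : String => decide (2 ≤ (vals.count k : Int)) := rfl
  rw [hcomp, ← pvOfList_filter]
  congr 1
  apply List.filter_congr
  intro a _
  have hmem : (a ∈ (vals.foldl
      (fun (p : PySem.Set String × PySem.Set String) x =>
        if PySem.Set.contains p.1 x then (p.1, PySem.Set.add p.2 x) else (PySem.Set.add p.1 x, p.2))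
      (([] : List String), ([] : List String))).2) ↔ 2 ≤ vals.count a := by
    rw [pvFreq_mem]
    simp
  set F := (vals.foldl
      (fun (p : PySem.Set String × PySem.Set String) x =>
        if PySem.Set.contains p.1 x then (p.1, PySem.Set.add p.2 x) else (PySem.Set.add p.1 x, p.2))
      (([] : List String), ([] : List String))).2 with hF
  have hcm : PySem.Set.contains F a = true ↔ a ∈ F :=
    ⟨List.mem_of_elem_eq_true, List.elem_eq_true_of_mem⟩
  cases h : PySem.Set.contains F a
  · simp only [decide_eq_false_iff_not]
    intro hc
    have h2 : 2 ≤ vals.count a := by exact_mod_cast hc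
    exact absurd (hcm.mpr (hmem.mpr h2)) (by rw [h]; simp)
  · simp only [decide_eq_true_eq]
    exact_mod_cast hmem.mp (hcm.mp h)
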